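-- pv_equiv track=rewrite | github.com/LACpara/my-lab-assistant | pdf2md/merge_pages.py | _smooth_pages
-- ===== SOURCE A (Python) =====
-- def _smooth_pages(candidates):
--     smoothed = []
--     for i, p in enumerate(candidates):
--         if i > 0 and abs(p - smoothed[-1]) > 1:
--             smoothed.append(smoothed[-1] + 1)
--         else:
--             smoothed.append(p)
--     return smoothed
-- ===== SOURCE B (Python) =====
-- def _smooth_pages(candidates):
--     # Anchor-and-ramp algorithm: while candidates are rejected, the output is a
--     # +1 arithmetic ramp from the last accepted candidate (the anchor), so we
--     # test each candidate against the closed-form ramp value and emit whole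
--     # rejected runs as range() segments instead of threading the previous
--     # smoothed value element by element.
--     if not candidates:
--         return []
--     out = [candidates[0]]
--     base_i, base_v = 0, candidates[0]
--     n = len(candidates)
--     for j in range(1, n):
--         p = candidates[j]
--         ramp = base_v + (j - base_i)   # ramp value the output would reach at j
--         if ramp - 2 <= p <= ramp:      # within 1 of the previous output value
--             out.extend(range(base_v + 1, ramp))  # flush the rejected run
--             out.append(p)
--             base_i, base_v = j, p
--     out.extend(range(base_v + 1, base_v + (n - base_i)))  # trailing rejected run
--     return out
-- ===== Notes on version B (the rewrite author's own statement) =====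
-- stated objective: alternative
-- what changed: Replaced A's element-by-element recurrence that appends to and re-reads the last element of the output with an anchor-and-ramp algorithm: each candidate is tested against the closed-form +1 ramp from the last accepted candidate, and rejected runs are emitted wholesale as range() segments instead of one element per step.
import Mathlib
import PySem

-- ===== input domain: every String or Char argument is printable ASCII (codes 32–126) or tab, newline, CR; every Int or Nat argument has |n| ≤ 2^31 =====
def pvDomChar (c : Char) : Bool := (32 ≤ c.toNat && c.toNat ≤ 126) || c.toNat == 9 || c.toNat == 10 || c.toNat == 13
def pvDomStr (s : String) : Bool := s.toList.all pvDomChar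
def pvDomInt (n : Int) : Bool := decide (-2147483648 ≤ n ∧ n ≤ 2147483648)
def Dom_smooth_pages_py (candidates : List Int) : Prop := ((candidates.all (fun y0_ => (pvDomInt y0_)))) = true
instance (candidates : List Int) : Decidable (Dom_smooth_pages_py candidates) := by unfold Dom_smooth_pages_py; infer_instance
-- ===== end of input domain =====

-- B replaces A's element-by-element recurrence (re-reading the last output element) with an
-- anchor-and-ramp algorithm: candidates are tested against the closed-form +1 ramp from the last
-- accepted candidate, and rejected runs are emitted wholesale as ranges; objective: alternative.

-- ===== PORT A =====
-- the last element of smoothed is only read when i > 0, i.e. smoothed nonempty, where getLast?.getD 0 is exact.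
def smooth_pages_py (candidates : List Int) : List Int :=
  (PySem.List.enumerate candidates 0).foldl (fun smoothed ip =>
    if ip.1 > 0 && (ip.2 - smoothed.getLast?.getD 0).natAbs > 1 then
      smoothed ++ [smoothed.getLast?.getD 0 + 1]
    else smoothed ++ [ip.2]) []

-- ===== PORT B =====
-- range(v + 1, v + 1 + k) as a list
def pvRamp (v : Int) (k : Nat) : List Int :=
  (List.range k).map (fun t => v + 1 + (t : Int))

-- the for-loop of Source B over the candidates after the anchor; instead of Source B's two indices
-- (base_i, j) the port carries their difference d = j - base_i; rejected runs stay pending in d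
-- and are flushed as pvRamp segments exactly where Source B calls out.extend(range(...)).
def pvGo (v : Int) (d : Nat) : List Int → List Int
  | [] => pvRamp v (d - 1)
  | p :: rest =>
      if v + (d : Int) - 2 ≤ p ∧ p ≤ v + (d : Int) then
        pvRamp v (d - 1) ++ p :: pvGo p 1 rest
      else
        pvGo v (d + 1) rest

def smooth_pages_py_alt (candidates : List Int) : List Int :=
  match candidates with
  | [] => []
  | p :: rest => p :: pvGo p 1 rest

-- ===== PRECONDITION & SPEC =====
def Spec_smooth_pages_py (candidates : List Int) (out : List Int) : Prop := out = smooth_pages_py_alt candidates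
instance (candidates : List Int) (out : List Int) : Decidable (Spec_smooth_pages_py candidates out) := by unfold Spec_smooth_pages_py; infer_instance

-- ===== CLAIM (what is proved, stated in full; the proofs are below) =====
def Claim_equal_smooth_pages_py : Prop := ∀ (candidates : List Int), Dom_smooth_pages_py candidates → Spec_smooth_pages_py candidates (smooth_pages_py candidates)

-- ===== LEMMAS AND PROOFS =====

-- the per-element recurrence both programs compute, used as the common reference
def pvStep (prev p : Int) : Int := if (p - prev).natAbs > 1 then prev + 1 else p

def pvAccum : Int → List Int → List Int
  | _, [] => []
  | prev, p :: rest => pvStep prev p :: pvAccum (pvStep prev p) rest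

theorem pvRamp_snoc (v : Int) (d : Nat) (hd : 1 ≤ d) :
    pvRamp v d = pvRamp v (d - 1) ++ [v + (d : Int)] := by
  unfold pvRamp
  obtain ⟨e, rfl⟩ : ∃ e, d = e + 1 := ⟨d - 1, by omega⟩
  rw [List.range_succ]
  simp
  omega

theorem pvGo_eq (l : List Int) : ∀ (v : Int) (d : Nat), 1 ≤ d →
    pvGo v d l = pvRamp v (d - 1) ++ pvAccum (v + (d : Int) - 1) l := by
  induction l with
  | nil => intro v d _; simp [pvGo, pvAccum]
  | cons p rest ih =>
    intro v d hd
    unfold pvGo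
    by_cases h : v + (d : Int) - 2 ≤ p ∧ p ≤ v + (d : Int)
    · rw [if_pos h, ih p 1 le_rfl]
      have hstep : pvStep (v + (d : Int) - 1) p = p := by
        simp only [pvStep, if_neg (by omega : ¬ (p - (v + (d : Int) - 1)).natAbs > 1)]
      simp [pvAccum, hstep, pvRamp]
    · rw [if_neg h, ih v (d + 1) (by omega)]
      have hstep : pvStep (v + (d : Int) - 1) p = v + (d : Int) := by
        simp only [pvStep, if_pos (by omega : (p - (v + (d : Int) - 1)).natAbs > 1)]
        omega
      rw [show (d + 1 - 1 : Nat) = d from rfl, pvRamp_snoc v d hd]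
      simp only [pvAccum, hstep]
      rw [show (v + (↑(d + 1) : Int) - 1) = v + (d : Int) by push_cast; ring]
      simp

theorem pv_fold_go (l : List Int) : ∀ (s : Int) (acc : List Int) (prev : Int), 0 < s →
    acc.getLast? = some prev →
    (PySem.List.enumerate l s).foldl (fun smoothed ip =>
      if ip.1 > 0 && (ip.2 - smoothed.getLast?.getD 0).natAbs > 1 then
        smoothed ++ [smoothed.getLast?.getD 0 + 1]
      else smoothed ++ [ip.2]) acc = acc ++ pvAccum prev l := by
  induction l with
  | nil => intro s acc prev _ _; simp [PySem.List.enumerate_nil, pvAccum]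
  | cons p rest ih =>
    intro s acc prev hs hlast
    rw [PySem.List.enumerate_cons]
    simp only [List.foldl_cons, hlast, Option.getD_some]
    have hs' : decide (s > 0) = true := by simp [hs]
    simp only [hs', Bool.true_and, decide_eq_true_eq]
    by_cases h : (p - prev).natAbs > 1
    · rw [if_pos h,
        ih (s + 1) (acc ++ [prev + 1]) (pvStep prev p) (by omega) (by simp [pvStep, h])]
      simp [pvAccum, pvStep, h]
    · rw [if_neg h,
        ih (s + 1) (acc ++ [p]) (pvStep prev p) (by omega) (by simp [pvStep, h])]
      simp [pvAccum, pvStep, h]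

theorem smooth_pages_py_spec_aux (candidates : List Int) :
    smooth_pages_py candidates = smooth_pages_py_alt candidates := by
  cases candidates with
  | nil => rfl
  | cons p rest =>
    unfold smooth_pages_py smooth_pages_py_alt
    rw [PySem.List.enumerate_cons]
    simp only [List.foldl_cons]
    rw [if_neg (by simp), show ((0:Int) + 1) = 1 from rfl,
      pv_fold_go rest 1 ([] ++ [p]) p (by omega) (by simp),
      pvGo_eq rest p 1 le_rfl]
    simp [pvRamp]

-- ===== VERDICT (by name: the statement is the Claim_ definition above) =====
theorem smooth_pages_py_spec : Claim_equal_smooth_pages_py := by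
  intro candidates _
  unfold Spec_smooth_pages_py
  exact smooth_pages_py_spec_aux candidates
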